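-- pv_equiv track=rewrite | github.com/pervcomp/Procem | python_poc/utils/simple_modbus.py | toMod10
-- ===== SOURCE A (Python) =====
-- def toMod10(values, word_order="big"):
--     if word_order == "little":
--         values = reversed(values)
--     value = 0
--     for x in values:
--         value *= 10000
--         value += x
--     return value
-- ===== SOURCE B (Python) =====
-- def toMod10(values, word_order="big"):
--     vs = values if word_order == "little" else reversed(values)
--     total = 0
--     w = 1
--     for v in vs:
--         total += v * w
--         w *= 10000
--     return total
-- ===== Notes on version B (the rewrite author's own statement) =====
-- stated objective: alternative
-- what changed: Replaces the Horner recurrence (value = value*10000 + x over the most-significant-first order) with positional-weight summation: it walks the values least-significant-first, maintaining the current base-10000 weight and adding v*weight to a running sum.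
import Mathlib
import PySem

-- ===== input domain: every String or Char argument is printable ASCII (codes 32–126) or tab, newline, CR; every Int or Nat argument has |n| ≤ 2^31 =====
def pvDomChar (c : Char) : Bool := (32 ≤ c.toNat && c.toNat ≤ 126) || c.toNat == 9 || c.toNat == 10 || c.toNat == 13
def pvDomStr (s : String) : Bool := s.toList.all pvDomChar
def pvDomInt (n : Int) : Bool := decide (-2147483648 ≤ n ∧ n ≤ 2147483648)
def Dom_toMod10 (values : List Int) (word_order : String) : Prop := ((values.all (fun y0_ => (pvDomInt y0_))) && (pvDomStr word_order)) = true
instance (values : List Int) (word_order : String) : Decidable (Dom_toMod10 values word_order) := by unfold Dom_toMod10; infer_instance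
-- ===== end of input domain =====

-- ===== PORT A =====
-- One-line note: B computes each digit's base-10000 positional weight directly instead of a running accumulator (alternative decomposition).
def toMod10 (values : List Int) (word_order : String) : Int :=
  let vs := if word_order == "little" then values.reverse else values
  vs.foldl (fun value x => value * 10000 + x) 0

-- ===== PORT B =====
def toMod10_alt (values : List Int) (word_order : String) : Int :=
  let vs := if word_order == "little" then values else values.reverse
  (vs.foldl (fun (p : Int × Int) v => (p.1 + v * p.2, p.2 * 10000)) (0, 1)).1

-- ===== PRECONDITION & SPEC =====
def Spec_toMod10 (values : List Int) (word_order : String) (out : Int) : Prop := out = toMod10_alt values word_order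
instance (values : List Int) (word_order : String) (out : Int) : Decidable (Spec_toMod10 values word_order out) := by unfold Spec_toMod10; infer_instance

-- ===== CLAIM (what is proved, stated in full; the proofs are below) =====
def Claim_equal_toMod10 : Prop := ∀ (values : List Int) (word_order : String), Dom_toMod10 values word_order → Spec_toMod10 values word_order (toMod10 values word_order)

-- ===== LEMMAS AND PROOFS =====

-- ===== VERDICT (by name: the statement is the Claim_ definition above) =====
-- Least-significant-first positional value of a list.
def pvLSF : List Int → Int
  | [] => 0
  | v :: r => v + 10000 * pvLSF r

-- The weight-accumulator fold computes total + w * (positional value).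
theorem wf_foldl (t : List Int) : ∀ total w : Int,
    (t.foldl (fun (p : Int × Int) v => (p.1 + v * p.2, p.2 * 10000)) (total, w)).1
      = total + w * pvLSF t := by
  induction t with
  | nil => intro total w; simp [pvLSF]
  | cons v r ih =>
      intro total w
      simp only [List.foldl_cons, ih, pvLSF]
      ring

-- Horner over the reversed list is the least-significant-first value.
theorem horner_reverse (t : List Int) :
    t.reverse.foldl (fun value x => value * 10000 + x) 0 = pvLSF t := by
  induction t with
  | nil => simp [pvLSF]
  | cons v r ih =>
      simp only [List.reverse_cons, List.foldl_append, List.foldl_cons, List.foldl_nil,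
        ih, pvLSF]
      ring

theorem toMod10_spec : Claim_equal_toMod10 := by
  intro values word_order _
  unfold Spec_toMod10 toMod10 toMod10_alt
  by_cases h : word_order == "little"
  · simp only [h, if_true]
    rw [wf_foldl, horner_reverse]; ring
  · simp only [h, Bool.false_eq_true, if_false]
    rw [wf_foldl, ← horner_reverse values.reverse, List.reverse_reverse]; ring
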